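-- pv_equiv track=rewrite | github.com/niall-oc/things | codility/longest_password.py | solution
-- ===== SOURCE A (Python) =====
-- def solution(S, delimiter=' '):
--     max_len = 0
--     for passwd in S.split(delimiter):
--         if passwd:
--             char = digit = bad = 0
--             for c in passwd:
--                 if c.isalpha():
--                     char += 1
--                 elif c.isdigit():
--                     digit += 1
--                 else:
--                     bad = True
--             if not bad and not char%2 and digit%2:
--                 max_len = max(max_len, len(passwd))
--
--     return max_len or -1
-- ===== SOURCE B (Python) =====
-- def solution(S, delimiter=' '):
--     def valid(t):
--         letters = digits = 0
--         for c in t: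
--             if c.isalpha():
--                 letters += 1
--             elif c.isdigit():
--                 digits += 1
--             else:
--                 return False
--         return letters % 2 == 0 and digits % 2 == 1
--
--     for t in sorted(S.split(delimiter), key=len, reverse=True):
--         if valid(t):
--             return len(t)
--     return -1
-- ===== Notes on version B (the rewrite author's own statement) =====
-- stated objective: alternative
-- what changed: Replaces A's single-pass running-maximum with a sort-by-length-descending then first-match search using an early-returning validity predicate.
import Mathlib
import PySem

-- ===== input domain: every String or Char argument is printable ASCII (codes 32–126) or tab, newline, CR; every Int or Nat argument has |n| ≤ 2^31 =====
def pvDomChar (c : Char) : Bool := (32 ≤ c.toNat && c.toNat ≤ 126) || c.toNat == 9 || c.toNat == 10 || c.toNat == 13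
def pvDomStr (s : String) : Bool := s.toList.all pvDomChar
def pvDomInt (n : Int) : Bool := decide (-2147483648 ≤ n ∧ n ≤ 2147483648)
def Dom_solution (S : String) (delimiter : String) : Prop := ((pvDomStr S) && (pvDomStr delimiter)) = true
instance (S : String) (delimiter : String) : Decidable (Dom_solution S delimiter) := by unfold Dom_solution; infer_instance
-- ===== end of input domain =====

-- B replaces A's single-pass running maximum by sort-by-length-descending then first valid token (alternative decomposition, same result).


-- ===== PORT A =====
-- inner 'for c in passwd' loop: state (char, digit, bad)
def pvAStep (s : Int × Int × Bool) (c : Char) : Int × Int × Bool :=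
  if PySem.Chars.isalpha c then (s.1 + 1, s.2.1, s.2.2)
  else if PySem.Chars.isdigit c then (s.1, s.2.1 + 1, s.2.2)
  else (s.1, s.2.1, true)

def solution (S : String) (delimiter : String) : Int :=
  match PySem.Chars.split? S.toList delimiter.toList with
  | none => 0  -- unreachable: Python raises ValueError on empty delimiter; excluded by Pre_solution
  | some toks =>
    let max_len : Int := toks.foldl (fun max_len passwd =>
      if passwd ≠ [] then
        let st := passwd.foldl pvAStep (0, 0, false)
        if st.2.2 = false ∧ PySem.Int.mod st.1 2 = 0 ∧ PySem.Int.mod st.2.1 2 ≠ 0 then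
          max max_len (passwd.length : Int)
        else max_len
      else max_len) 0
    if max_len = 0 then -1 else max_len  -- 'max_len or -1'

-- ===== PORT B =====
-- Source B's 'valid' helper: early return False on a bad char, else parity test at the end
def pvValidGo (letters digits : Int) : List Char → Bool
  | [] => PySem.Int.mod letters 2 == 0 && PySem.Int.mod digits 2 == 1
  | c :: cs =>
    if PySem.Chars.isalpha c then pvValidGo (letters + 1) digits cs
    else if PySem.Chars.isdigit c then pvValidGo letters (digits + 1) cs
    else false

def pvValid (t : List Char) : Bool := pvValidGo 0 0 t

-- Source B's main loop: walk the sorted tokens, return len of the first valid one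
def pvFirstValid : List (List Char) → Int
  | [] => -1
  | t :: ts => if pvValid t then (t.length : Int) else pvFirstValid ts

def solution_alt (S : String) (delimiter : String) : Int :=
  match PySem.Chars.split? S.toList delimiter.toList with
  | none => 0  -- unreachable under Pre_solution (Python raises)
  | some toks =>
    pvFirstValid (PySem.List.sorted toks (fun t => (t.length : Int)) true)

-- ===== PRECONDITION & SPEC =====
-- Pre_ excludes only an empty delimiter, on which Python's str.split raises ValueError in both A and B.
def Pre_solution (S : String) (delimiter : String) : Prop := delimiter ≠ ""
instance (S : String) (delimiter : String) : Decidable (Pre_solution S delimiter) := by unfold Pre_solution; infer_instance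
def pvWitness_solution : String × String := ("abc a1c 1", " ")

def Spec_solution (S : String) (delimiter : String) (out : Int) : Prop := out = solution_alt S delimiter
instance (S : String) (delimiter : String) (out : Int) : Decidable (Spec_solution S delimiter out) := by unfold Spec_solution; infer_instance

-- ===== CLAIM (what is proved, stated in full; the proofs are below) =====
def Claim_equal_solution : Prop := ∀ (S : String) (delimiter : String), Dom_solution S delimiter → Pre_solution S delimiter → Spec_solution S delimiter (solution S delimiter)

-- ===== LEMMAS AND PROOFS =====

-- the canonical fold both results are compared against
def pvMFold (acc : Int) (L : List (List Char)) : Int :=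
  L.foldl (fun acc t => if pvValid t then max acc (t.length : Int) else acc) acc

lemma pvValid_nil : pvValid [] = false := rfl

-- once bad is set it stays set
lemma pvBad_stays (cs : List Char) (l d : Int) : (cs.foldl pvAStep (l, d, true)).2.2 = true := by
  induction cs generalizing l d with
  | nil => rfl
  | cons c cs ih => simp only [List.foldl, pvAStep]; split_ifs <;> exact ih _ _

-- A's per-token test equals Source B's validity predicate
lemma pvValid_iff_fold (cs : List Char) (l d : Int) :
    ((cs.foldl pvAStep (l, d, false)).2.2 = false ∧
      PySem.Int.mod (cs.foldl pvAStep (l, d, false)).1 2 = 0 ∧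
      PySem.Int.mod (cs.foldl pvAStep (l, d, false)).2.1 2 ≠ 0)
      ↔ pvValidGo l d cs = true := by
  induction cs generalizing l d with
  | nil =>
    simp only [List.foldl, pvValidGo]
    rw [PySem.Int.mod_eq_emod_of_pos (by norm_num : (0:Int) < 2) (a := l),
        PySem.Int.mod_eq_emod_of_pos (by norm_num : (0:Int) < 2) (a := d)]
    have h1 : l % 2 = 0 ∨ l % 2 = 1 := by omega
    have h2 : d % 2 = 0 ∨ d % 2 = 1 := by omega
    rcases h1 with h | h <;> rcases h2 with h' | h' <;> simp [h, h']
  | cons c cs ih =>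
    simp only [List.foldl, pvAStep, pvValidGo]
    split_ifs with h1 h2
    · exact ih (l + 1) d
    · exact ih l (d + 1)
    · simp [pvBad_stays]

-- fold of max stays put when the accumulator already dominates all lengths
lemma pvMFold_const (ts : List (List Char)) (acc : Int)
    (h : ∀ s ∈ ts, (s.length : Int) ≤ acc) : pvMFold acc ts = acc := by
  induction ts generalizing acc with
  | nil => rfl
  | cons t ts ih =>
    simp only [pvMFold, List.foldl] at *
    have ht := h t (List.mem_cons_self ..)
    have hm : max acc (t.length : Int) = acc := by omega
    split_ifs <;> [rw [hm]; skip] <;> exact ih acc (fun s hs => h s (List.mem_cons_of_mem _ hs))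

-- a valid token is nonempty
lemma pvValid_length_pos (t : List Char) (h : pvValid t = true) : 0 < t.length := by
  cases t with
  | nil => simp [pvValid_nil] at h
  | cons c cs => exact Nat.succ_pos _

-- on a length-descending list, first-valid = the running max (or -1 at 0)
lemma pvFirstValid_eq_mfold (L : List (List Char))
    (hp : L.Pairwise (fun a b => (b.length : Int) ≤ (a.length : Int))) :
    pvFirstValid L = (if pvMFold 0 L = 0 then -1 else pvMFold 0 L) := by
  induction L with
  | nil => rfl
  | cons t ts ih =>
    rcases List.pairwise_cons.mp hp with ⟨hdom, htail⟩
    by_cases hv : pvValid t = true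
    · have hlen := pvValid_length_pos t hv
      have h0 : max (0 : Int) (t.length : Int) = (t.length : Int) := by omega
      simp only [pvFirstValid, pvMFold, List.foldl, hv, if_true, h0]
      have hc : pvMFold (t.length : Int) ts = (t.length : Int) := pvMFold_const ts _ hdom
      simp only [pvMFold] at hc
      rw [hc, if_neg (by omega)]
    · simp only [pvFirstValid, pvMFold, List.foldl, hv, Bool.false_eq_true, if_false]
      simpa only [pvMFold] using ih htail

-- A's outer fold is the canonical fold
lemma pvAfold_eq_mfold (toks : List (List Char)) :
    toks.foldl (fun max_len passwd =>
      if passwd ≠ [] then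
        let st := passwd.foldl pvAStep (0, 0, false)
        if st.2.2 = false ∧ PySem.Int.mod st.1 2 = 0 ∧ PySem.Int.mod st.2.1 2 ≠ 0 then
          max max_len (passwd.length : Int)
        else max_len
      else max_len) 0 = pvMFold 0 toks := by
  unfold pvMFold
  apply PySem.List.foldl_congr_mem
  intro acc t _
  by_cases hnil : t = []
  · subst hnil; simp [pvValid_nil]
  · simp only [hnil, ne_eq, not_false_eq_true, if_true]
    by_cases hv : pvValid t = true
    · rw [if_pos ((pvValid_iff_fold t 0 0).mpr hv), if_pos hv]
    · rw [if_neg (fun hc => hv ((pvValid_iff_fold t 0 0).mp hc)),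
         if_neg (by simpa using hv)]

-- the canonical fold is permutation-invariant
lemma pvMFold_perm (L M : List (List Char)) (h : L.Perm M) : pvMFold 0 L = pvMFold 0 M := by
  unfold pvMFold
  haveI : RightCommutative (fun (acc : Int) (t : List Char) =>
      if pvValid t then max acc (t.length : Int) else acc) :=
    ⟨fun acc a b => by split_ifs <;> omega⟩
  exact h.foldl_eq 0

-- ===== VERDICT (by name: the statement is the Claim_ definition above) =====
theorem solution_spec : Claim_equal_solution := by
  intro S delimiter _ hpre
  unfold Spec_solution solution solution_alt
  cases hsplit : PySem.Chars.split? S.toList delimiter.toList with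
  | none => rfl
  | some toks =>
    simp only
    rw [pvAfold_eq_mfold]
    rw [pvFirstValid_eq_mfold _ (PySem.List.sorted_pairwise_rev toks (fun t => ((t.length : Int))))]
    rw [pvMFold_perm _ _ (PySem.List.sorted_perm toks (fun t => ((t.length : Int))) true).symm]
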